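-- pv_equiv track=rewrite | github.com/AIForHindustan/aion_algo_trading | src/shared_core/core/indicators/lifecycle.py | _categorize_indicators
-- ===== SOURCE A (Python) =====
-- from typing import Any, Dict, List, Optional, Sequence, Set
--
-- def _categorize_indicators(indicators: Set[str]) -> Dict[str, Set[str]]:
--     categories = {"ta": set(), "greeks": set(), "volume": set()}
--     greek_indicators = {
--         "delta",
--         "gamma",
--         "theta",
--         "vega",
--         "rho",
--         "option_price",
--         "dte_years",
--         "trading_dte",
--         "expiry_series",
--     }
--     volume_indicators = {"volume_ratio", "volume_profile", "volume_ratio_ma_5", "volume_ratio_ma_20"}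
--     for indicator in indicators:
--         if indicator in greek_indicators:
--             categories["greeks"].add(indicator)
--         elif indicator in volume_indicators:
--             categories["volume"].add(indicator)
--         else:
--             categories["ta"].add(indicator)
--     return {k: v for k, v in categories.items() if v}
-- ===== SOURCE B (Python) =====
-- def _categorize_indicators(indicators):
--     # One flat name->category lookup table instead of two membership sets,
--     # and one staged pass per category instead of a per-element classification loop.
--     category_of = {
--         "delta": "greeks",
--         "gamma": "greeks",
--         "theta": "greeks",
--         "vega": "greeks",
--         "rho": "greeks",
--         "option_price": "greeks",
--         "dte_years": "greeks",
--         "trading_dte": "greeks",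
--         "expiry_series": "greeks",
--         "volume_ratio": "volume",
--         "volume_profile": "volume",
--         "volume_ratio_ma_5": "volume",
--         "volume_ratio_ma_20": "volume",
--     }
--     result = {}
--     for category in ("ta", "greeks", "volume"):
--         members = {i for i in indicators if category_of.get(i, "ta") == category}
--         if members:
--             result[category] = members
--     return result
-- ===== Notes on version B (the rewrite author's own statement) =====
-- stated objective: alternative
-- what changed: Replaces A's per-element branch-on-two-membership-sets loop over a mutable dict of three pre-seeded buckets by a single flat name-to-category lookup table plus one staged comprehension pass per category, inserting each bucket into the result only if non-empty (no final empty-bucket filter pass).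
import Mathlib
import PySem

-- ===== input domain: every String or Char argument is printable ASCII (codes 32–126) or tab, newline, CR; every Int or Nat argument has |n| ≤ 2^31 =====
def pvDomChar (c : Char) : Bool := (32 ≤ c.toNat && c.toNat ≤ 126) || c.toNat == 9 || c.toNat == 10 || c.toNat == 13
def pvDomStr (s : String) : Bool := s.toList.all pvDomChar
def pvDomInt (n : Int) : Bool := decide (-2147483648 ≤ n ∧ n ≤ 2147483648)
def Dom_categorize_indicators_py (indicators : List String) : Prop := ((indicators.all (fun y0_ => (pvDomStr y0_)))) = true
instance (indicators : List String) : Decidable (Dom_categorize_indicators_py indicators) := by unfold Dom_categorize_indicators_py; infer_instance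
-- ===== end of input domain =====

-- B replaces A's per-element branch-on-two-membership-sets loop over pre-seeded buckets by a flat
-- name→category lookup table and one staged pass per category, inserting only non-empty buckets
-- (alternative decomposition, same cost). Neither version mutates its argument.
-- The Python parameter is a set[str]: it arrives as a List String and both ports treat it as the
-- set of its elements (PySem.Set.ofList / idempotent Set.add), so duplicates are immaterial.

-- ===== PORT A =====
-- the two literal sets of A
def pvGreekIndicators : PySem.Set String :=
  PySem.Set.ofList ["delta", "gamma", "theta", "vega", "rho", "option_price",
                    "dte_years", "trading_dte", "expiry_series"]
def pvVolumeIndicators : PySem.Set String :=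
  PySem.Set.ofList ["volume_ratio", "volume_profile", "volume_ratio_ma_5", "volume_ratio_ma_20"]

def categorize_indicators_py (indicators : List String) : List (String × List String) :=
  let categories : PySem.Dict String (PySem.Set String) :=
    PySem.Dict.mk [("ta", PySem.Set.empty), ("greeks", PySem.Set.empty), ("volume", PySem.Set.empty)]
  let categories := indicators.foldl (fun cats indicator =>
    if PySem.Set.contains pvGreekIndicators indicator then
      PySem.Dict.modify cats "greeks" PySem.Set.empty (fun s => PySem.Set.add s indicator)
    else if PySem.Set.contains pvVolumeIndicators indicator then
      PySem.Dict.modify cats "volume" PySem.Set.empty (fun s => PySem.Set.add s indicator)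
    else
      PySem.Dict.modify cats "ta" PySem.Set.empty (fun s => PySem.Set.add s indicator)) categories
  (PySem.Dict.items categories).filter (fun kv => !kv.2.isEmpty)

-- ===== PORT B =====
-- Source B's literal name→category lookup table
def pvCategoryOf : PySem.Dict String String := PySem.Dict.mk
  [("delta", "greeks"), ("gamma", "greeks"), ("theta", "greeks"), ("vega", "greeks"),
   ("rho", "greeks"), ("option_price", "greeks"), ("dte_years", "greeks"),
   ("trading_dte", "greeks"), ("expiry_series", "greeks"),
   ("volume_ratio", "volume"), ("volume_profile", "volume"),
   ("volume_ratio_ma_5", "volume"), ("volume_ratio_ma_20", "volume")]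

def categorize_indicators_py_alt (indicators : List String) : List (String × List String) :=
  let result :=
    (["ta", "greeks", "volume"] : List String).foldl (fun result category =>
      let members : PySem.Set String :=
        PySem.Set.ofList (indicators.filter
          (fun i => PySem.Dict.getD pvCategoryOf i "ta" == category))
      if members.isEmpty then result else PySem.Dict.insert result category members)
      PySem.Dict.empty
  PySem.Dict.items result

-- ===== PRECONDITION & SPEC =====
def Spec_categorize_indicators_py (indicators : List String) (out : List (String × List String)) : Prop := out = categorize_indicators_py_alt indicators
instance (indicators : List String) (out : List (String × List String)) : Decidable (Spec_categorize_indicators_py indicators out) := by unfold Spec_categorize_indicators_py; infer_instance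

-- ===== CLAIM (what is proved, stated in full; the proofs are below) =====
def Claim_equal_categorize_indicators_py : Prop := ∀ (indicators : List String), Dom_categorize_indicators_py indicators → Spec_categorize_indicators_py indicators (categorize_indicators_py indicators)

-- ===== LEMMAS AND PROOFS =====

-- the lookup table agrees pointwise with A's two membership tests
theorem pv_table_eq (x : String) : PySem.Dict.getD pvCategoryOf x "ta"
    = if PySem.Set.contains pvGreekIndicators x then "greeks"
      else if PySem.Set.contains pvVolumeIndicators x then "volume" else "ta" := by
  by_cases h1 : PySem.Set.contains pvGreekIndicators x = true
  · rw [if_pos h1]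
    have hm : x ∈ (["delta", "gamma", "theta", "vega", "rho", "option_price", "dte_years",
        "trading_dte", "expiry_series"] : List String) := by
      simpa [pvGreekIndicators] using (PySem.Set.contains_iff _ _).mp h1
    fin_cases hm <;> decide
  · rw [Bool.not_eq_true] at h1
    rw [h1, if_neg (by simp)]
    by_cases h2 : PySem.Set.contains pvVolumeIndicators x = true
    · rw [if_pos h2]
      have hm : x ∈ (["volume_ratio", "volume_profile", "volume_ratio_ma_5",
          "volume_ratio_ma_20"] : List String) := by
        simpa [pvVolumeIndicators] using (PySem.Set.contains_iff _ _).mp h2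
      fin_cases hm <;> decide
    · rw [Bool.not_eq_true] at h2
      rw [h2, if_neg (by simp)]
      simp [pvGreekIndicators, pvVolumeIndicators, PySem.Set.contains, PySem.Set.ofList] at h1 h2
      obtain ⟨n1, n2, n3, n4, n5, n6, n7, n8, n9⟩ := h1
      obtain ⟨n10, n11, n12, n13⟩ := h2
      have e1 : ("delta" == x) = false := beq_eq_false_iff_ne.mpr (fun h => n1 h.symm)
      have e2 : ("gamma" == x) = false := beq_eq_false_iff_ne.mpr (fun h => n2 h.symm)
      have e3 : ("theta" == x) = false := beq_eq_false_iff_ne.mpr (fun h => n3 h.symm)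
      have e4 : ("vega" == x) = false := beq_eq_false_iff_ne.mpr (fun h => n4 h.symm)
      have e5 : ("rho" == x) = false := beq_eq_false_iff_ne.mpr (fun h => n5 h.symm)
      have e6 : ("option_price" == x) = false := beq_eq_false_iff_ne.mpr (fun h => n6 h.symm)
      have e7 : ("dte_years" == x) = false := beq_eq_false_iff_ne.mpr (fun h => n7 h.symm)
      have e8 : ("trading_dte" == x) = false := beq_eq_false_iff_ne.mpr (fun h => n8 h.symm)
      have e9 : ("expiry_series" == x) = false := beq_eq_false_iff_ne.mpr (fun h => n9 h.symm)
      have e10 : ("volume_ratio" == x) = false := beq_eq_false_iff_ne.mpr (fun h => n10 h.symm)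
      have e11 : ("volume_profile" == x) = false := beq_eq_false_iff_ne.mpr (fun h => n11 h.symm)
      have e12 : ("volume_ratio_ma_5" == x) = false := beq_eq_false_iff_ne.mpr (fun h => n12 h.symm)
      have e13 : ("volume_ratio_ma_20" == x) = false := beq_eq_false_iff_ne.mpr (fun h => n13 h.symm)
      simp only [pvCategoryOf, PySem.Dict.getD, PySem.Dict.get?, List.find?,
        e1, e2, e3, e4, e5, e6, e7, e8, e9, e10, e11, e12, e13,
        Option.map_none, Option.getD_none]

-- B's three filter predicates coincide with A's three classification tests
theorem pv_pred_ta (x : String) :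
    (PySem.Dict.getD pvCategoryOf x "ta" == "ta")
      = (!PySem.Set.contains pvGreekIndicators x && !PySem.Set.contains pvVolumeIndicators x) := by
  rw [pv_table_eq]
  by_cases hg : PySem.Set.contains pvGreekIndicators x = true <;>
    by_cases hv : PySem.Set.contains pvVolumeIndicators x = true <;>
    simp_all
theorem pv_pred_greeks (x : String) :
    (PySem.Dict.getD pvCategoryOf x "ta" == "greeks")
      = PySem.Set.contains pvGreekIndicators x := by
  rw [pv_table_eq]
  by_cases hg : PySem.Set.contains pvGreekIndicators x = true <;>
    by_cases hv : PySem.Set.contains pvVolumeIndicators x = true <;>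
    simp_all
theorem pv_pred_volume (x : String) :
    (PySem.Dict.getD pvCategoryOf x "ta" == "volume")
      = (!PySem.Set.contains pvGreekIndicators x && PySem.Set.contains pvVolumeIndicators x) := by
  rw [pv_table_eq]
  by_cases hg : PySem.Set.contains pvGreekIndicators x = true <;>
    by_cases hv : PySem.Set.contains pvVolumeIndicators x = true <;>
    simp_all

-- shape of A's loop: the dict stays a three-key dict whose buckets are Set.updates
theorem pv_fold_shape (xs : List String) (t g v : PySem.Set String) :
    xs.foldl (fun cats indicator =>
      if PySem.Set.contains pvGreekIndicators indicator then
        PySem.Dict.modify cats "greeks" PySem.Set.empty (fun s => PySem.Set.add s indicator)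
      else if PySem.Set.contains pvVolumeIndicators indicator then
        PySem.Dict.modify cats "volume" PySem.Set.empty (fun s => PySem.Set.add s indicator)
      else
        PySem.Dict.modify cats "ta" PySem.Set.empty (fun s => PySem.Set.add s indicator))
      (PySem.Dict.mk [("ta", t), ("greeks", g), ("volume", v)])
    = PySem.Dict.mk
        [("ta", PySem.Set.update t (xs.filter (fun x =>
            !PySem.Set.contains pvGreekIndicators x && !PySem.Set.contains pvVolumeIndicators x))),
         ("greeks", PySem.Set.update g (xs.filter (fun x => PySem.Set.contains pvGreekIndicators x))),
         ("volume", PySem.Set.update v (xs.filter (fun x =>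
            !PySem.Set.contains pvGreekIndicators x && PySem.Set.contains pvVolumeIndicators x)))] := by
  induction xs generalizing t g v with
  | nil => simp [PySem.Set.update]
  | cons x xs ih =>
    rw [List.foldl_cons]
    by_cases hg : PySem.Set.contains pvGreekIndicators x = true
    · have hgm : x ∈ pvGreekIndicators := (PySem.Set.contains_iff _ _).mp hg
      rw [if_pos hg]
      have hmod : PySem.Dict.modify (PySem.Dict.mk [("ta", t), ("greeks", g), ("volume", v)])
          "greeks" PySem.Set.empty (fun s => PySem.Set.add s x)
          = PySem.Dict.mk [("ta", t), ("greeks", PySem.Set.add g x), ("volume", v)] := by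
        simp [PySem.Dict.modify, PySem.Dict.insert, PySem.Dict.getD, PySem.Dict.get?,
          PySem.Dict.contains, PySem.Set.empty]
      rw [hmod, ih]
      simp [hgm, PySem.Set.update_cons]
    · have hgm : x ∉ pvGreekIndicators := fun hm => hg ((PySem.Set.contains_iff _ _).mpr hm)
      rw [if_neg hg]
      by_cases hv : PySem.Set.contains pvVolumeIndicators x = true
      · have hvm : x ∈ pvVolumeIndicators := (PySem.Set.contains_iff _ _).mp hv
        rw [if_pos hv]
        have hmod : PySem.Dict.modify (PySem.Dict.mk [("ta", t), ("greeks", g), ("volume", v)])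
            "volume" PySem.Set.empty (fun s => PySem.Set.add s x)
            = PySem.Dict.mk [("ta", t), ("greeks", g), ("volume", PySem.Set.add v x)] := by
          simp [PySem.Dict.modify, PySem.Dict.insert, PySem.Dict.getD, PySem.Dict.get?,
            PySem.Dict.contains, PySem.Set.empty]
        rw [hmod, ih]
        simp [hgm, hvm, PySem.Set.update_cons]
      · have hvm : x ∉ pvVolumeIndicators := fun hm => hv ((PySem.Set.contains_iff _ _).mpr hm)
        rw [if_neg hv]
        have hmod : PySem.Dict.modify (PySem.Dict.mk [("ta", t), ("greeks", g), ("volume", v)])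
            "ta" PySem.Set.empty (fun s => PySem.Set.add s x)
            = PySem.Dict.mk [("ta", PySem.Set.add t x), ("greeks", g), ("volume", v)] := by
          simp [PySem.Dict.modify, PySem.Dict.insert, PySem.Dict.getD, PySem.Dict.get?,
            PySem.Dict.contains, PySem.Set.empty]
        rw [hmod, ih]
        simp [hgm, hvm, PySem.Set.update_cons]

-- ===== VERDICT (by name: the statement is the Claim_ definition above) =====
theorem categorize_indicators_py_spec : Claim_equal_categorize_indicators_py := by
  intro indicators _
  unfold Spec_categorize_indicators_py
  show categorize_indicators_py indicators = categorize_indicators_py_alt indicators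
  simp only [categorize_indicators_py, categorize_indicators_py_alt]
  rw [pv_fold_shape]
  have hnil : (PySem.Set.empty : PySem.Set String) = [] := rfl
  rw [hnil, PySem.Set.update_nil_left, PySem.Set.update_nil_left, PySem.Set.update_nil_left,
    ← List.filter_congr (fun x _ => pv_pred_ta x),
    ← List.filter_congr (fun x _ => pv_pred_greeks x),
    ← List.filter_congr (fun x _ => pv_pred_volume x)]
  simp only [List.foldl]
  generalize PySem.Set.ofList (indicators.filter
      (fun i => PySem.Dict.getD pvCategoryOf i "ta" == "ta")) = T
  generalize PySem.Set.ofList (indicators.filter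
      (fun i => PySem.Dict.getD pvCategoryOf i "ta" == "greeks")) = G
  generalize PySem.Set.ofList (indicators.filter
      (fun i => PySem.Dict.getD pvCategoryOf i "ta" == "volume")) = V
  by_cases hT : T.isEmpty = true <;> by_cases hG : G.isEmpty = true <;>
    by_cases hV : V.isEmpty = true <;>
    simp [hT, hG, hV, PySem.Dict.insert, PySem.Dict.empty,
      PySem.Dict.contains, List.filter]
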